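-- pv_equiv track=rewrite | github.com/tedee09/a-star_robot_to_goal | ros2_ws/build/path_planner/build/lib/path_planner/path_planner_node.py | inflate_obstacles
-- ===== SOURCE A (Python) =====
-- def inflate_obstacles(grid, radius=1):
--     rows = len(grid)
--     cols = len(grid[0])
--     inflated = [row[:] for row in grid]  # duplikat grid
--
--     for y in range(rows):
--         for x in range(cols):
--             if grid[y][x] == 1:
--                 for dy in range(-radius, radius + 1):
--                     for dx in range(-radius, radius + 1):
--                         ny = y + dy
--                         nx = x + dx
--                         if 0 <= ny < rows and 0 <= nx < cols:
--                             inflated[ny][nx] = 1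
--     return inflated
-- ===== SOURCE B (Python) =====
-- def inflate_obstacles(grid, radius=1):
--     rows = len(grid)
--     cols = len(grid[0])
--     # horizontal pass: cells within `radius` of an obstacle in their own row
--     horiz = [
--         [any(row[j] == 1 for j in range(max(0, x - radius), min(cols, x + radius + 1)))
--          for x in range(cols)]
--         for row in grid
--     ]
--     # vertical pass: mark dilated cells onto a copy of the grid
--     inflated = [row[:] for row in grid]
--     for y in range(rows):
--         for x in range(cols):
--             if any(horiz[i][x] for i in range(max(0, y - radius), min(rows, y + radius + 1))):
--                 inflated[y][x] = 1
--     return inflated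
-- ===== Notes on version B (the rewrite author's own statement) =====
-- stated objective: faster
-- what changed: Replaces A's per-obstacle scatter of a (2r+1)x(2r+1) square with a separable two-pass dilation (horizontal window per row, then a vertical window marked onto a copy of the grid), cutting per-cell work from O(r^2) to O(r); Pre_ excludes only the inputs on which A raises IndexError: the empty grid and grids with a row shorter than the first.
import Mathlib
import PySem

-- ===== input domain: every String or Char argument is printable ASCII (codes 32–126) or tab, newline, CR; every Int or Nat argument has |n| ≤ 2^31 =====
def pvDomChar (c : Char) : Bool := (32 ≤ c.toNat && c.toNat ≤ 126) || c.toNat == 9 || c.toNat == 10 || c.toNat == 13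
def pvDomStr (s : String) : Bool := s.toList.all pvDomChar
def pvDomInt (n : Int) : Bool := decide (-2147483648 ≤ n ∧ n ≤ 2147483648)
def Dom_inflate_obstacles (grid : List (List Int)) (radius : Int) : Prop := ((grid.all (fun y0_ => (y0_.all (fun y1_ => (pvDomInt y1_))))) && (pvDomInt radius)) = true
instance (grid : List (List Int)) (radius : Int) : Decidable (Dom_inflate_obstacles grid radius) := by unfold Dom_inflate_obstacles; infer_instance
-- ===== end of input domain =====

-- B replaces A's per-obstacle scatter of a (2r+1)² square with a separable two-pass dilation
-- (horizontal window per row, then a vertical window marked onto a copy of the grid).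
-- Return value only (neither implementation mutates its argument through this call's contract).

-- ===== PORT A =====
-- literal port of A's nested scatter loops; pyGetD/pySetD are exact here because every grid
-- access happens at indices from the ranges / under the 0 ≤ ny < rows, 0 ≤ nx < cols guard,
-- and Pre_ gives every row exactly cols cells
def inflate_obstacles (grid : List (List Int)) (radius : Int) : List (List Int) :=
  let rows : Int := grid.length
  let cols : Int := (grid.headD []).length  -- grid[0]; Pre_ excludes grid = [] (Python IndexError)
  let inflated : List (List Int) := grid.map (fun row => row)  -- [row[:] for row in grid]
  (PySem.List.pyRange 0 rows 1).foldl (fun acc y =>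
    (PySem.List.pyRange 0 cols 1).foldl (fun acc x =>
      if PySem.List.pyGetD (PySem.List.pyGetD grid y []) x 0 = 1 then
        (PySem.List.pyRange (-radius) (radius + 1) 1).foldl (fun acc dy =>
          (PySem.List.pyRange (-radius) (radius + 1) 1).foldl (fun acc dx =>
            let ny := y + dy
            let nx := x + dx
            if 0 ≤ ny ∧ ny < rows ∧ 0 ≤ nx ∧ nx < cols then
              PySem.List.pySetD acc ny (PySem.List.pySetD (PySem.List.pyGetD acc ny []) nx 1)
            else acc) acc) acc
      else acc) acc) inflated

-- ===== PORT B =====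
-- literal port of Source B: horizontal pass builds boolean row masks, vertical pass marks the
-- dilated cells onto a copy of the grid
def inflate_obstacles_alt (grid : List (List Int)) (radius : Int) : List (List Int) :=
  let rows : Int := grid.length
  let cols : Int := (grid.headD []).length  -- grid[0]; Pre_ excludes grid = []
  let horiz : List (List Bool) := grid.map (fun row =>
    (PySem.List.pyRange 0 cols 1).map (fun x =>
      (PySem.List.pyRange (max 0 (x - radius)) (min cols (x + radius + 1)) 1).any
        (fun j => PySem.List.pyGetD row j 0 = 1)))
  let inflated : List (List Int) := grid.map (fun row => row)  -- [row[:] for row in grid]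
  (PySem.List.pyRange 0 rows 1).foldl (fun acc y =>
    (PySem.List.pyRange 0 cols 1).foldl (fun acc x =>
      if (PySem.List.pyRange (max 0 (y - radius)) (min rows (y + radius + 1)) 1).any
           (fun i => PySem.List.pyGetD (PySem.List.pyGetD horiz i []) x false) then
        PySem.List.pySetD acc y (PySem.List.pySetD (PySem.List.pyGetD acc y []) x 1)
      else acc) acc) inflated

-- ===== PRECONDITION & SPEC =====
-- Pre_ excludes exactly the inputs where Python A raises IndexError: the empty grid (grid[0])
-- and grids with some row shorter than the first row (grid[y][x] for x < cols).
def Pre_inflate_obstacles (grid : List (List Int)) (radius : Int) : Prop :=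
  grid ≠ [] ∧ ∀ row ∈ grid, (grid.headD []).length ≤ row.length
instance (grid : List (List Int)) (radius : Int) : Decidable (Pre_inflate_obstacles grid radius) := by
  unfold Pre_inflate_obstacles; infer_instance

def pvWitness_inflate_obstacles : List (List Int) × Int := ([[1, 0, 0], [0, 0, 0], [0, 0, 2]], 1)

def Spec_inflate_obstacles (grid : List (List Int)) (radius : Int) (out : List (List Int)) : Prop := out = inflate_obstacles_alt grid radius
instance (grid : List (List Int)) (radius : Int) (out : List (List Int)) : Decidable (Spec_inflate_obstacles grid radius out) := by unfold Spec_inflate_obstacles; infer_instance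

-- ===== CLAIM (what is proved, stated in full; the proofs are below) =====
def Claim_equal_inflate_obstacles : Prop := ∀ (grid : List (List Int)) (radius : Int), Dom_inflate_obstacles grid radius → Pre_inflate_obstacles grid radius → Spec_inflate_obstacles grid radius (inflate_obstacles grid radius)

-- ===== LEMMAS AND PROOFS =====

-- cell accessor used by all proofs (0 / [] when out of range)
def pvG2 (g : List (List Int)) (y x : Nat) : Int := (g.getD y []).getD x 0

-- "s has the same shape as g": same number of rows, rows of the same lengths
def pvShp (g s : List (List Int)) : Prop :=
  s.length = g.length ∧ ∀ i : Nat, (s.getD i []).length = (g.getD i []).length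

-- "cell (y,x) is within Chebyshev radius r of an obstacle of g"
def pvCov (g : List (List Int)) (r : Int) (y x : Int) : Prop :=
  ∃ y0 x0 : Int, 0 ≤ y0 ∧ y0 < (g.length : Int) ∧ 0 ≤ x0 ∧ x0 < ((g.headD []).length : Int) ∧
    (g.getD y0.toNat []).getD x0.toNat 0 = 1 ∧
    -r ≤ y - y0 ∧ y - y0 ≤ r ∧ -r ≤ x - x0 ∧ x - x0 ≤ r

-- proof-side decomposition of A's nested loops (defeq to the port's inlined lambdas)
def pvWr (grid s : List (List Int)) (ny nx : Int) : List (List Int) :=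
  if 0 ≤ ny ∧ ny < (grid.length : Int) ∧ 0 ≤ nx ∧ nx < ((grid.headD []).length : Int) then
    PySem.List.pySetD s ny (PySem.List.pySetD (PySem.List.pyGetD s ny []) nx 1)
  else s

def pvLoopDx (grid : List (List Int)) (radius y0 x0 dy : Int) (s : List (List Int)) : List (List Int) :=
  (PySem.List.pyRange (-radius) (radius + 1) 1).foldl (fun acc dx => pvWr grid acc (y0 + dy) (x0 + dx)) s

def pvLoopDy (grid : List (List Int)) (radius y0 x0 : Int) (s : List (List Int)) : List (List Int) :=
  (PySem.List.pyRange (-radius) (radius + 1) 1).foldl (fun acc dy => pvLoopDx grid radius y0 x0 dy acc) s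

def pvLoopX (grid : List (List Int)) (radius y0 : Int) (s : List (List Int)) : List (List Int) :=
  (PySem.List.pyRange 0 ((grid.headD []).length : Int) 1).foldl (fun acc x0 =>
    if PySem.List.pyGetD (PySem.List.pyGetD grid y0 []) x0 0 = 1 then pvLoopDy grid radius y0 x0 acc else acc) s

def pvLoopY (grid : List (List Int)) (radius : Int) (s : List (List Int)) : List (List Int) :=
  (PySem.List.pyRange 0 (grid.length : Int) 1).foldl (fun acc y0 => pvLoopX grid radius y0 acc) s

-- the write condition of A's innermost body, and its existential closures per loop level
def pvC4 (grid : List (List Int)) (y0 x0 dy dx : Int) (y x : Nat) : Prop :=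
  y0 + dy = (y : Int) ∧ x0 + dx = (x : Int) ∧ 0 ≤ y0 + dy ∧ y0 + dy < (grid.length : Int) ∧
  0 ≤ x0 + dx ∧ x0 + dx < ((grid.headD []).length : Int)

def pvC3 (grid : List (List Int)) (radius y0 x0 dy : Int) (y x : Nat) : Prop :=
  ∃ dx ∈ PySem.List.pyRange (-radius) (radius + 1) 1, pvC4 grid y0 x0 dy dx y x

def pvC2 (grid : List (List Int)) (radius y0 x0 : Int) (y x : Nat) : Prop :=
  PySem.List.pyGetD (PySem.List.pyGetD grid y0 []) x0 0 = 1 ∧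
  ∃ dy ∈ PySem.List.pyRange (-radius) (radius + 1) 1, pvC3 grid radius y0 x0 dy y x

def pvC1 (grid : List (List Int)) (radius y0 : Int) (y x : Nat) : Prop :=
  ∃ x0 ∈ PySem.List.pyRange 0 ((grid.headD []).length : Int) 1, pvC2 grid radius y0 x0 y x

-- exactly the existential pv_foldl_mark extracts from A's four nested loops
def pvE (grid : List (List Int)) (radius : Int) (y x : Nat) : Prop :=
  ∃ y0 ∈ PySem.List.pyRange 0 (grid.length : Int) 1, pvC1 grid radius y0 y x

theorem pv_getD_set {α : Type} (l : List α) (d : α) (a y : Nat) (v : α) :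
    (l.set a v).getD y d = if y = a ∧ a < l.length then v else l.getD y d := by
  simp [List.getD_eq_getElem?_getD, List.getElem?_set]
  split_ifs with h1 h2 h3 <;> simp_all

-- generic characterisation of a fold of conditional set-to-1 marks
theorem pv_foldl_mark {ι : Type} (g : List (List Int)) (f : List (List Int) → ι → List (List Int))
    (c : ι → Nat → Nat → Prop) :
    ∀ (L : List ι),
    (∀ s i, i ∈ L → pvShp g s → pvShp g (f s i) ∧ ∀ y x : Nat,
        (c i y x → pvG2 (f s i) y x = 1) ∧ (¬ c i y x → pvG2 (f s i) y x = pvG2 s y x)) →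
    ∀ (s : List (List Int)), pvShp g s →
      pvShp g (L.foldl f s) ∧ ∀ y x : Nat,
        ((∃ i ∈ L, c i y x) → pvG2 (L.foldl f s) y x = 1) ∧
        ((∀ i ∈ L, ¬ c i y x) → pvG2 (L.foldl f s) y x = pvG2 s y x) := by
  intro L
  induction L with
  | nil =>
    intro _ s hs
    exact ⟨hs, fun y x => ⟨fun ⟨i, hi, _⟩ => absurd hi (List.not_mem_nil), fun _ => rfl⟩⟩
  | cons hd tl ih =>
    intro hf s hs
    obtain ⟨hs1, hp1⟩ := hf s hd List.mem_cons_self hs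
    obtain ⟨hs2, hp2⟩ := ih (fun s i hi => hf s i (List.mem_cons_of_mem _ hi)) (f s hd) hs1
    refine ⟨hs2, fun y x => ⟨?_, ?_⟩⟩
    · rintro ⟨i, hi, hc⟩
      rcases List.mem_cons.1 hi with rfl | hitl
      · by_cases hex : ∃ j ∈ tl, c j y x
        · exact (hp2 y x).1 hex
        · push_neg at hex
          rw [List.foldl_cons, (hp2 y x).2 hex]
          exact (hp1 y x).1 hc
      · exact (hp2 y x).1 ⟨i, hitl, hc⟩
    · intro hall
      rw [List.foldl_cons, (hp2 y x).2 (fun i hi => hall i (List.mem_cons_of_mem _ hi)),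
        (hp1 y x).2 (hall hd List.mem_cons_self)]

-- effect of A's single write inflated[ny][nx] = 1 on shape and cells
theorem pv_write_char (g acc : List (List Int)) (hs : pvShp g acc)
    (hrows : ∀ row ∈ g, (g.headD []).length ≤ row.length)
    (ny nx : Int) (h0 : 0 ≤ ny) (h1 : ny < (g.length : Int))
    (h2 : 0 ≤ nx) (h3 : nx < ((g.headD []).length : Int)) :
    pvShp g (PySem.List.pySetD acc ny (PySem.List.pySetD (PySem.List.pyGetD acc ny []) nx 1)) ∧
    ∀ y x : Nat, (((y : Int) = ny ∧ (x : Int) = nx) → pvG2 (PySem.List.pySetD acc ny (PySem.List.pySetD (PySem.List.pyGetD acc ny []) nx 1)) y x = 1) ∧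
      (¬ ((y : Int) = ny ∧ (x : Int) = nx) → pvG2 (PySem.List.pySetD acc ny (PySem.List.pySetD (PySem.List.pyGetD acc ny []) nx 1)) y x = pvG2 acc y x) := by
  have hlen : acc.length = g.length := hs.1
  have hnyl : ny.toNat < acc.length := by omega
  have hrowlen : ∀ i : Nat, i < g.length → (g.headD []).length ≤ (acc.getD i []).length := by
    intro i hi
    rw [hs.2 i, List.getD_eq_getElem _ _ hi]
    exact hrows _ (List.getElem_mem hi)
  have hset2 : PySem.List.pySetD acc ny (PySem.List.pySetD (PySem.List.pyGetD acc ny ([] : List Int)) nx 1)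
      = acc.set ny.toNat ((acc.getD ny.toNat []).set nx.toNat 1) := by
    rw [PySem.List.pyGetD_eq_getElem acc [] h0 (by omega), ← List.getD_eq_getElem _ _ hnyl,
      PySem.List.pySetD_of_nonneg _ _ h2, PySem.List.pySetD_of_nonneg _ _ h0]
  rw [hset2]
  have hnxl : nx.toNat < (acc.getD ny.toNat []).length := by
    have := hrowlen ny.toNat (by omega); omega
  constructor
  · constructor
    · simp [hlen]
    · intro i
      rw [pv_getD_set]
      split_ifs with h
      · rw [List.length_set, h.1, hs.2 ny.toNat]
      · exact hs.2 i
  · intro y x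
    constructor
    · rintro ⟨hy, hx⟩
      unfold pvG2
      rw [pv_getD_set, if_pos ⟨by omega, hnyl⟩, pv_getD_set, if_pos ⟨by omega, hnxl⟩]
    · intro hne
      unfold pvG2
      rw [pv_getD_set]
      split_ifs with h
      · rw [pv_getD_set, if_neg, h.1]
        rintro ⟨hx, _⟩
        exact hne ⟨by omega, by omega⟩
      · rfl

theorem pvLoopDx_char (grid : List (List Int)) (radius y0 x0 dy : Int)
    (hrows : ∀ row ∈ grid, (grid.headD []).length ≤ row.length)
    (s : List (List Int)) (hs : pvShp grid s) :
    pvShp grid (pvLoopDx grid radius y0 x0 dy s) ∧ ∀ y x : Nat,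
      (pvC3 grid radius y0 x0 dy y x → pvG2 (pvLoopDx grid radius y0 x0 dy s) y x = 1) ∧
      ((∀ dx ∈ PySem.List.pyRange (-radius) (radius + 1) 1, ¬ pvC4 grid y0 x0 dy dx y x) →
        pvG2 (pvLoopDx grid radius y0 x0 dy s) y x = pvG2 s y x) := by
  unfold pvLoopDx pvC3
  refine pv_foldl_mark grid _ (fun dx y x => pvC4 grid y0 x0 dy dx y x) _ ?_ s hs
  intro s' dx _ hs'
  simp only [pvWr, pvC4]
  by_cases hg : 0 ≤ y0 + dy ∧ y0 + dy < (grid.length : Int) ∧ 0 ≤ x0 + dx ∧ x0 + dx < ((grid.headD []).length : Int)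
  · rw [if_pos hg]
    obtain ⟨w1, w2⟩ := pv_write_char grid s' hs' hrows (y0 + dy) (x0 + dx) hg.1 hg.2.1 hg.2.2.1 hg.2.2.2
    refine ⟨w1, fun y x => ⟨fun hc => (w2 y x).1 ⟨hc.1.symm, hc.2.1.symm⟩, fun hn => (w2 y x).2 ?_⟩⟩
    rintro ⟨k1, k2⟩
    exact hn ⟨k1.symm, k2.symm, hg.1, hg.2.1, hg.2.2.1, hg.2.2.2⟩
  · rw [if_neg hg]
    exact ⟨hs', fun y x =>
      ⟨fun hc => absurd ⟨hc.2.2.1, hc.2.2.2.1, hc.2.2.2.2.1, hc.2.2.2.2.2⟩ hg, fun _ => rfl⟩⟩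

theorem pvLoopDy_char (grid : List (List Int)) (radius y0 x0 : Int)
    (hrows : ∀ row ∈ grid, (grid.headD []).length ≤ row.length)
    (s : List (List Int)) (hs : pvShp grid s) :
    pvShp grid (pvLoopDy grid radius y0 x0 s) ∧ ∀ y x : Nat,
      ((∃ dy ∈ PySem.List.pyRange (-radius) (radius + 1) 1, pvC3 grid radius y0 x0 dy y x) →
        pvG2 (pvLoopDy grid radius y0 x0 s) y x = 1) ∧
      ((∀ dy ∈ PySem.List.pyRange (-radius) (radius + 1) 1, ¬ pvC3 grid radius y0 x0 dy y x) →
        pvG2 (pvLoopDy grid radius y0 x0 s) y x = pvG2 s y x) := by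
  unfold pvLoopDy
  refine pv_foldl_mark grid _ (fun dy y x => pvC3 grid radius y0 x0 dy y x) _ ?_ s hs
  intro s' dy _ hs'
  obtain ⟨h1, h2⟩ := pvLoopDx_char grid radius y0 x0 dy hrows s' hs'
  refine ⟨h1, fun y x => ⟨(h2 y x).1, fun hn => (h2 y x).2 ?_⟩⟩
  unfold pvC3 at hn
  push_neg at hn
  exact hn

theorem pvLoopX_char (grid : List (List Int)) (radius y0 : Int)
    (hrows : ∀ row ∈ grid, (grid.headD []).length ≤ row.length)
    (s : List (List Int)) (hs : pvShp grid s) :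
    pvShp grid (pvLoopX grid radius y0 s) ∧ ∀ y x : Nat,
      (pvC1 grid radius y0 y x → pvG2 (pvLoopX grid radius y0 s) y x = 1) ∧
      ((∀ x0 ∈ PySem.List.pyRange 0 ((grid.headD []).length : Int) 1, ¬ pvC2 grid radius y0 x0 y x) →
        pvG2 (pvLoopX grid radius y0 s) y x = pvG2 s y x) := by
  unfold pvLoopX pvC1
  refine pv_foldl_mark grid _ (fun x0 y x => pvC2 grid radius y0 x0 y x) _ ?_ s hs
  intro s' x0 _ hs'
  simp only []
  by_cases hread : PySem.List.pyGetD (PySem.List.pyGetD grid y0 []) x0 0 = 1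
  · rw [if_pos hread]
    obtain ⟨h1, h2⟩ := pvLoopDy_char grid radius y0 x0 hrows s' hs'
    refine ⟨h1, fun y x => ⟨fun hc => (h2 y x).1 hc.2, fun hn => (h2 y x).2 ?_⟩⟩
    intro dy hdy hc3
    exact hn ⟨hread, dy, hdy, hc3⟩
  · rw [if_neg hread]
    exact ⟨hs', fun y x => ⟨fun hc => absurd hc.1 hread, fun _ => rfl⟩⟩

theorem pvLoopY_char (grid : List (List Int)) (radius : Int)
    (hrows : ∀ row ∈ grid, (grid.headD []).length ≤ row.length)
    (s : List (List Int)) (hs : pvShp grid s) :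
    pvShp grid (pvLoopY grid radius s) ∧ ∀ y x : Nat,
      (pvE grid radius y x → pvG2 (pvLoopY grid radius s) y x = 1) ∧
      ((∀ y0 ∈ PySem.List.pyRange 0 (grid.length : Int) 1, ¬ pvC1 grid radius y0 y x) →
        pvG2 (pvLoopY grid radius s) y x = pvG2 s y x) := by
  unfold pvLoopY pvE
  refine pv_foldl_mark grid _ (fun y0 y x => pvC1 grid radius y0 y x) _ ?_ s hs
  intro s' y0 _ hs'
  obtain ⟨h1, h2⟩ := pvLoopX_char grid radius y0 hrows s' hs'
  refine ⟨h1, fun y x => ⟨(h2 y x).1, fun hn => (h2 y x).2 ?_⟩⟩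
  unfold pvC1 at hn
  push_neg at hn
  exact hn

theorem pvA_eq_loops (grid : List (List Int)) (radius : Int) :
    inflate_obstacles grid radius = pvLoopY grid radius grid := by
  simp only [inflate_obstacles, pvLoopY, pvLoopX, pvLoopDy, pvLoopDx, pvWr, List.map_id']

theorem pvA_char (grid : List (List Int)) (radius : Int)
    (hrows : ∀ row ∈ grid, (grid.headD []).length ≤ row.length) :
    pvShp grid (inflate_obstacles grid radius) ∧
    ∀ y x : Nat, (pvE grid radius y x → pvG2 (inflate_obstacles grid radius) y x = 1) ∧
      (¬ pvE grid radius y x → pvG2 (inflate_obstacles grid radius) y x = pvG2 grid y x) := by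
  rw [pvA_eq_loops]
  obtain ⟨h1, h2⟩ := pvLoopY_char grid radius hrows grid ⟨rfl, fun i => rfl⟩
  refine ⟨h1, fun y x => ⟨(h2 y x).1, fun hn => (h2 y x).2 ?_⟩⟩
  unfold pvE at hn
  push_neg at hn
  exact hn

theorem pvE_iff (grid : List (List Int)) (radius : Int)
    (hrows : ∀ row ∈ grid, (grid.headD []).length ≤ row.length) (y x : Nat) :
    pvE grid radius y x ↔
      (y < grid.length ∧ x < (grid.headD []).length ∧ pvCov grid radius y x) := by
  have hC : ∀ i : Nat, i < grid.length → (grid.headD []).length ≤ (grid.getD i []).length := by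
    intro i hi
    rw [List.getD_eq_getElem _ _ hi]
    exact hrows _ (List.getElem_mem hi)
  unfold pvE pvC1 pvC2 pvC3 pvC4 pvCov
  constructor
  · rintro ⟨y0, hy0, x0, hx0, hread, dy, hdy, dx, hdx, e1, e2, b1, b2, b3, b4⟩
    rw [PySem.List.mem_pyRange_one] at hy0 hx0 hdy hdx
    have hxrow : x0 < ((grid.getD y0.toNat []).length : Int) := by
      have := hC y0.toNat (by omega); omega
    rw [PySem.List.pyGetD_eq_getElem grid [] hy0.1 hy0.2, ← List.getD_eq_getElem _ _ (by omega : y0.toNat < grid.length),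
      PySem.List.pyGetD_eq_getElem _ 0 hx0.1 hxrow, ← List.getD_eq_getElem _ _ (by omega : x0.toNat < (grid.getD y0.toNat []).length)] at hread
    exact ⟨by omega, by omega, y0, x0, hy0.1, hy0.2, hx0.1, hx0.2, hread,
      by omega, by omega, by omega, by omega⟩
  · rintro ⟨hy, hx, y0, x0, b1, b2, b3, b4, hread, d1, d2, d3, d4⟩
    have hxrow : x0 < ((grid.getD y0.toNat []).length : Int) := by
      have := hC y0.toNat (by omega); omega
    rw [List.getD_eq_getElem _ _ (show x0.toNat < (grid.getD y0.toNat []).length by omega),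
      ← PySem.List.pyGetD_eq_getElem _ 0 b3 hxrow,
      List.getD_eq_getElem _ _ (show y0.toNat < grid.length by omega),
      ← PySem.List.pyGetD_eq_getElem grid [] b1 b2] at hread
    exact ⟨y0, PySem.List.mem_pyRange_one.2 ⟨b1, b2⟩, x0, PySem.List.mem_pyRange_one.2 ⟨b3, b4⟩,
      hread, (y : Int) - y0, PySem.List.mem_pyRange_one.2 ⟨by omega, by omega⟩,
      (x : Int) - x0, PySem.List.mem_pyRange_one.2 ⟨by omega, by omega⟩,
      by omega, by omega, by omega, by omega⟩

-- proof-side names for B's two passes (defeq to the port's lambdas after zeta)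
def pvHoriz (grid : List (List Int)) (radius : Int) : List (List Bool) :=
  grid.map (fun row =>
    (PySem.List.pyRange 0 ((grid.headD []).length : Int) 1).map (fun x =>
      (PySem.List.pyRange (max 0 (x - radius)) (min ((grid.headD []).length : Int) (x + radius + 1)) 1).any
        (fun j => PySem.List.pyGetD row j 0 = 1)))

def pvBandB (grid : List (List Int)) (radius y x : Int) : Bool :=
  (PySem.List.pyRange (max 0 (y - radius)) (min (grid.length : Int) (y + radius + 1)) 1).any
    (fun i => PySem.List.pyGetD (PySem.List.pyGetD (pvHoriz grid radius) i []) x false)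

def pvBLoopX (grid : List (List Int)) (radius y0 : Int) (s : List (List Int)) : List (List Int) :=
  (PySem.List.pyRange 0 ((grid.headD []).length : Int) 1).foldl (fun acc x0 =>
    if pvBandB grid radius y0 x0 then
      PySem.List.pySetD acc y0 (PySem.List.pySetD (PySem.List.pyGetD acc y0 []) x0 1)
    else acc) s

def pvBLoopY (grid : List (List Int)) (radius : Int) (s : List (List Int)) : List (List Int) :=
  (PySem.List.pyRange 0 (grid.length : Int) 1).foldl (fun acc y0 => pvBLoopX grid radius y0 acc) s

theorem pvB_eq_loops (grid : List (List Int)) (radius : Int) :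
    inflate_obstacles_alt grid radius = pvBLoopY grid radius grid := by
  have h : grid.map (fun row => row) = grid := List.map_id' grid
  show (PySem.List.pyRange 0 (grid.length : Int) 1).foldl
      (fun acc y0 => pvBLoopX grid radius y0 acc) (grid.map (fun row => row)) = _
  rw [h]; rfl

-- the write condition of B's marks, per loop level
def pvBC2 (grid : List (List Int)) (radius y0 x0 : Int) (y x : Nat) : Prop :=
  pvBandB grid radius y0 x0 = true ∧ y0 = (y : Int) ∧ x0 = (x : Int)

def pvBC1 (grid : List (List Int)) (radius y0 : Int) (y x : Nat) : Prop :=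
  ∃ x0 ∈ PySem.List.pyRange 0 ((grid.headD []).length : Int) 1, pvBC2 grid radius y0 x0 y x

def pvEB (grid : List (List Int)) (radius : Int) (y x : Nat) : Prop :=
  ∃ y0 ∈ PySem.List.pyRange 0 (grid.length : Int) 1, pvBC1 grid radius y0 y x

theorem pvBLoopX_char (grid : List (List Int)) (radius : Int)
    (hrows : ∀ row ∈ grid, (grid.headD []).length ≤ row.length)
    (y0 : Int) (h0 : 0 ≤ y0) (h1 : y0 < (grid.length : Int))
    (s : List (List Int)) (hs : pvShp grid s) :
    pvShp grid (pvBLoopX grid radius y0 s) ∧ ∀ y x : Nat,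
      (pvBC1 grid radius y0 y x → pvG2 (pvBLoopX grid radius y0 s) y x = 1) ∧
      ((∀ x0 ∈ PySem.List.pyRange 0 ((grid.headD []).length : Int) 1, ¬ pvBC2 grid radius y0 x0 y x) →
        pvG2 (pvBLoopX grid radius y0 s) y x = pvG2 s y x) := by
  unfold pvBLoopX pvBC1
  refine pv_foldl_mark grid _ (fun x0 y x => pvBC2 grid radius y0 x0 y x) _ ?_ s hs
  intro s' x0 hx0 hs'
  rw [PySem.List.mem_pyRange_one] at hx0
  unfold pvBC2
  by_cases hband : pvBandB grid radius y0 x0 = true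
  · rw [if_pos hband]
    obtain ⟨w1, w2⟩ := pv_write_char grid s' hs' hrows y0 x0 h0 h1 hx0.1 hx0.2
    refine ⟨w1, fun y x => ⟨fun hc => (w2 y x).1 ⟨hc.2.1.symm, hc.2.2.symm⟩, fun hn => (w2 y x).2 ?_⟩⟩
    rintro ⟨k1, k2⟩
    exact hn ⟨hband, k1.symm, k2.symm⟩
  · rw [if_neg hband]
    exact ⟨hs', fun y x => ⟨fun hc => absurd hc.1 hband, fun _ => rfl⟩⟩

theorem pvBLoopY_char (grid : List (List Int)) (radius : Int)
    (hrows : ∀ row ∈ grid, (grid.headD []).length ≤ row.length)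
    (s : List (List Int)) (hs : pvShp grid s) :
    pvShp grid (pvBLoopY grid radius s) ∧ ∀ y x : Nat,
      (pvEB grid radius y x → pvG2 (pvBLoopY grid radius s) y x = 1) ∧
      ((∀ y0 ∈ PySem.List.pyRange 0 (grid.length : Int) 1, ¬ pvBC1 grid radius y0 y x) →
        pvG2 (pvBLoopY grid radius s) y x = pvG2 s y x) := by
  unfold pvBLoopY pvEB
  refine pv_foldl_mark grid _ (fun y0 y x => pvBC1 grid radius y0 y x) _ ?_ s hs
  intro s' y0 hy0 hs'
  rw [PySem.List.mem_pyRange_one] at hy0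
  obtain ⟨h1, h2⟩ := pvBLoopX_char grid radius hrows y0 hy0.1 hy0.2 s' hs'
  refine ⟨h1, fun y x => ⟨(h2 y x).1, fun hn => (h2 y x).2 ?_⟩⟩
  unfold pvBC1 at hn
  push_neg at hn
  exact hn

theorem pvB_char (grid : List (List Int)) (radius : Int)
    (hrows : ∀ row ∈ grid, (grid.headD []).length ≤ row.length) :
    pvShp grid (inflate_obstacles_alt grid radius) ∧
    ∀ y x : Nat, (pvEB grid radius y x → pvG2 (inflate_obstacles_alt grid radius) y x = 1) ∧
      (¬ pvEB grid radius y x → pvG2 (inflate_obstacles_alt grid radius) y x = pvG2 grid y x) := by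
  rw [pvB_eq_loops]
  obtain ⟨h1, h2⟩ := pvBLoopY_char grid radius hrows grid ⟨rfl, fun i => rfl⟩
  refine ⟨h1, fun y x => ⟨(h2 y x).1, fun hn => (h2 y x).2 ?_⟩⟩
  unfold pvEB at hn
  push_neg at hn
  exact hn

-- the value of a horizontal-mask cell, elementwise
theorem pvHoriz_cell (grid : List (List Int)) (radius : Int)
    (hrows : ∀ row ∈ grid, (grid.headD []).length ≤ row.length)
    (i : Int) (hi0 : 0 ≤ i) (hi1 : i < (grid.length : Int)) (x : Nat) (hx : x < (grid.headD []).length) :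
    (PySem.List.pyGetD (PySem.List.pyGetD (pvHoriz grid radius) i []) (x : Int) false = true) ↔
      ∃ j : Int, max 0 ((x : Int) - radius) ≤ j ∧ j < min ((grid.headD []).length : Int) ((x : Int) + radius + 1) ∧
        (grid.getD i.toNat []).getD j.toNat 0 = 1 := by
  rw [PySem.List.pyGetD_eq_getElem _ [] hi0 (by unfold pvHoriz; rw [List.length_map]; exact_mod_cast hi1)]
  unfold pvHoriz
  rw [List.getElem_map, PySem.List.pyGetD_map_pyRange _ _ _ _ hx]
  have hgd : grid[i.toNat]'(by omega) = grid.getD i.toNat [] := (List.getD_eq_getElem _ _ (by omega)).symm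
  rw [hgd]
  have hrowlen : (grid.headD []).length ≤ (grid.getD i.toNat []).length := by
    rw [List.getD_eq_getElem _ _ (by omega : i.toNat < grid.length)]
    exact hrows _ (List.getElem_mem _)
  rw [List.any_eq_true]
  constructor
  · rintro ⟨j, hj, hpj⟩
    rw [PySem.List.mem_pyRange_one] at hj
    simp only [decide_eq_true_eq] at hpj
    refine ⟨j, hj.1, hj.2, ?_⟩
    rw [PySem.List.pyGetD_eq_getElem _ 0 (le_trans (le_max_left 0 _) hj.1) (by omega)] at hpj
    rw [List.getD_eq_getElem _ _ (by omega)]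
    exact hpj
  · rintro ⟨j, hj1, hj2, hj3⟩
    refine ⟨j, PySem.List.mem_pyRange_one.2 ⟨hj1, hj2⟩, ?_⟩
    simp only [decide_eq_true_eq]
    rw [PySem.List.pyGetD_eq_getElem _ 0 (le_trans (le_max_left 0 _) hj1) (by omega)]
    rw [List.getD_eq_getElem _ _ (by omega)] at hj3
    exact hj3

-- B's vertical band test is exactly Chebyshev coverage
theorem pvB_band_iff (grid : List (List Int)) (radius : Int)
    (hrows : ∀ row ∈ grid, (grid.headD []).length ≤ row.length)
    (y x : Nat) (hy : y < grid.length) (hx : x < (grid.headD []).length) :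
    pvBandB grid radius (y : Int) (x : Int) = true ↔ pvCov grid radius y x := by
  unfold pvBandB
  rw [List.any_eq_true]
  constructor
  · rintro ⟨i, hi, hpi⟩
    rw [PySem.List.mem_pyRange_one] at hi
    obtain ⟨j, hj1, hj2, hj3⟩ := (pvHoriz_cell grid radius hrows i
      (le_trans (le_max_left 0 _) hi.1) (by omega) x hx).1 hpi
    exact ⟨i, j, by omega, by omega, by omega, by omega, hj3, by omega, by omega, by omega, by omega⟩
  · rintro ⟨y0, x0, b1, b2, b3, b4, hread, d1, d2, d3, d4⟩
    refine ⟨y0, PySem.List.mem_pyRange_one.2 ⟨by omega, by omega⟩, ?_⟩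
    exact (pvHoriz_cell grid radius hrows y0 b1 b2 x hx).2 ⟨x0, by omega, by omega, hread⟩

-- B marks exactly the cells A marks
theorem pvEB_iff_pvE (grid : List (List Int)) (radius : Int)
    (hrows : ∀ row ∈ grid, (grid.headD []).length ≤ row.length) (y x : Nat) :
    pvEB grid radius y x ↔ pvE grid radius y x := by
  rw [pvE_iff grid radius hrows y x]
  unfold pvEB pvBC1 pvBC2
  constructor
  · rintro ⟨y0, hy0, x0, hx0, hband, e1, e2⟩
    rw [PySem.List.mem_pyRange_one] at hy0 hx0
    have hy : y < grid.length := by omega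
    have hx : x < (grid.headD []).length := by omega
    subst e1; subst e2
    exact ⟨hy, hx, (pvB_band_iff grid radius hrows y x hy hx).1 hband⟩
  · rintro ⟨hy, hx, hcov⟩
    exact ⟨(y : Int), PySem.List.mem_pyRange_one.2 ⟨by omega, by omega⟩,
      (x : Int), PySem.List.mem_pyRange_one.2 ⟨by omega, by omega⟩,
      (pvB_band_iff grid radius hrows y x hy hx).2 hcov, rfl, rfl⟩

-- ===== VERDICT (by name: the statement is the Claim_ definition above) =====
theorem inflate_obstacles_spec : Claim_equal_inflate_obstacles := by
  intro grid radius _ hpre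
  obtain ⟨hne, hrows⟩ := hpre
  unfold Spec_inflate_obstacles
  obtain ⟨hshpA, hptA⟩ := pvA_char grid radius hrows
  obtain ⟨hshpB, hptB⟩ := pvB_char grid radius hrows
  apply List.ext_getElem (by rw [hshpA.1, hshpB.1])
  intro y hyA hyB
  have hy : y < grid.length := hshpA.1 ▸ hyA
  have hlenA : (inflate_obstacles grid radius).getD y [] = (inflate_obstacles grid radius)[y] :=
    List.getD_eq_getElem _ _ hyA
  have hlenB : (inflate_obstacles_alt grid radius).getD y [] = (inflate_obstacles_alt grid radius)[y] :=
    List.getD_eq_getElem _ _ hyB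
  apply List.ext_getElem
  · have h1 := hshpA.2 y
    have h2 := hshpB.2 y
    rw [hlenA] at h1; rw [hlenB] at h2; omega
  intro x hxA hxB
  have hvA : (inflate_obstacles grid radius)[y][x] = pvG2 (inflate_obstacles grid radius) y x := by
    unfold pvG2; rw [hlenA, List.getD_eq_getElem _ _ hxA]
  have hvB : (inflate_obstacles_alt grid radius)[y][x] = pvG2 (inflate_obstacles_alt grid radius) y x := by
    unfold pvG2; rw [hlenB, List.getD_eq_getElem _ _ hxB]
  rw [hvA, hvB]
  by_cases hE : pvE grid radius y x
  · rw [(hptA y x).1 hE, (hptB y x).1 ((pvEB_iff_pvE grid radius hrows y x).2 hE)]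
  · rw [(hptA y x).2 hE, (hptB y x).2 (fun hEB => hE ((pvEB_iff_pvE grid radius hrows y x).1 hEB))]
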